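-- pv_equiv track=rewrite | github.com/makowskiignacy/python-projects | automat_komorkowy.py | kontakt
-- ===== SOURCE A (Python) =====
-- def poprawne_wspolrzedne(x, y, N):
--     #Sprawdza czy współrzędne znajdują się w tablicy
--     if ((0 <= x) and (x < N) and (0 <= y) and (y < N)):
--         return True
--     else:
--         return False
--     pass
--
-- def kontakt(x, y, r, N, populacja):
--     #Zwraca liczę zarażonych w odległości r
--     zarazeni = 0
--     for i in range(x - r, x + r + 1):
--         for j in range(y - r, y + r + 1):
--             if (poprawne_wspolrzedne(i, j, N) and (i != x or j != y)):
--                 if populacja[i][j] == 1: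
--                     zarazeni += 1
--                     pass
--                 pass
--             pass
--         pass
--     return zarazeni
-- ===== SOURCE B (Python) =====
-- def kontakt(x, y, r, N, populacja):
--     # 2D prefix-sum table over the N x N board, then one O(1) inclusion-exclusion
--     # query for the clamped window, minus the center if it was counted.
--     ilo, ihi = max(x - r, 0), min(x + r, N - 1)
--     jlo, jhi = max(y - r, 0), min(y + r, N - 1)
--     if ilo > ihi or jlo > jhi:
--         return 0
--     # P[i][j] = number of infected cells in the sub-board populacja[:i][:j]
--     prev = [0] * (N + 1)
--     P = [prev]
--     for i in range(N):
--         cur = [0]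
--         last = 0
--         for j in range(N):
--             last = last + prev[j + 1] - prev[j] + (1 if populacja[i][j] == 1 else 0)
--             cur.append(last)
--         P.append(cur)
--         prev = cur
--     total = P[ihi + 1][jhi + 1] - P[ilo][jhi + 1] - P[ihi + 1][jlo] + P[ilo][jlo]
--     if ilo <= x <= ihi and jlo <= y <= jhi and populacja[x][y] == 1:
--         total -= 1
--     return total
-- ===== Notes on version B (the rewrite author's own statement) =====
-- stated objective: alternative
-- what changed: B replaces A's per-cell nested scan of the (2r+1)^2 neighborhood (with a bounds check and a center-skip test inside the loops) by building a 2D prefix-sum table of the N x N board and answering the clamped-window count with one O(1) inclusion-exclusion query, subtracting the center afterwards.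
-- outside the precondition, e.g. on kontakt(0, 0, 1, 3, [[1, 1], [1, 1]]): A returns 3, B raises IndexError; on kontakt(0, 0, 0, 1, [[]]): A returns 0, B raises IndexError
import Mathlib
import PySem

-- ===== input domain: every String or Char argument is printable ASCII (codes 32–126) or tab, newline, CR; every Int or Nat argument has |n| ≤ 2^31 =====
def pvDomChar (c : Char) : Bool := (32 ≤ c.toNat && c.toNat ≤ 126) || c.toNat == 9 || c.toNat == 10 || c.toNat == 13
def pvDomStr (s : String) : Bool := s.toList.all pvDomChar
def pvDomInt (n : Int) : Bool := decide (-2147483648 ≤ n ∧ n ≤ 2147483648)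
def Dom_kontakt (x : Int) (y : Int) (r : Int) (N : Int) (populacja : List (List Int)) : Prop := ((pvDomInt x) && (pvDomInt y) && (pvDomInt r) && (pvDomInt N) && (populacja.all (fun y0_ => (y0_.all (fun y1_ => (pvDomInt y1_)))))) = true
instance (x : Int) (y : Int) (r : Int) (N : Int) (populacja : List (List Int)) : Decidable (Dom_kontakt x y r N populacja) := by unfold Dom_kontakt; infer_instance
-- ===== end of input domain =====

-- B replaces the per-cell neighborhood scan by a 2D prefix-sum table of the N x N board and
-- one inclusion-exclusion query for the clamped window (objective: alternative algorithm).

-- ===== PORT A =====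
-- populacja[i][j]; exact wherever Pre_kontakt guarantees the indices are in range (defaults never reached there)
def pvCell (populacja : List (List Int)) (i j : Int) : Int :=
  PySem.List.pyGetD (PySem.List.pyGetD populacja i []) j 0

def poprawne_wspolrzedne (x y N : Int) : Bool :=
  if (0 ≤ x) ∧ (x < N) ∧ (0 ≤ y) ∧ (y < N) then true else false

def kontakt (x : Int) (y : Int) (r : Int) (N : Int) (populacja : List (List Int)) : Int :=
  (PySem.List.pyRange (x - r) (x + r + 1) 1).foldl (fun zarazeni i =>
    (PySem.List.pyRange (y - r) (y + r + 1) 1).foldl (fun zarazeni j =>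
      if poprawne_wspolrzedne i j N = true ∧ (i ≠ x ∨ j ≠ y) then
        (if pvCell populacja i j = 1 then zarazeni + 1 else zarazeni)
      else zarazeni) zarazeni) 0

-- ===== PORT B =====
-- B's inner row loop: extends 'cur' (t.1) with the running value 'last' (t.2)
def pvInner (populacja : List (List Int)) (prev : List Int) (i N : Int) : List Int × Int :=
  (PySem.List.pyRange 0 N 1).foldl (fun t j =>
    let last := t.2 + PySem.List.pyGetD prev (j + 1) 0 - PySem.List.pyGetD prev j 0 +
                (if pvCell populacja i j = 1 then 1 else 0)
    (t.1 ++ [last], last)) ([0], 0)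

-- B's outer loop: state = (P built so far, prev row)
def pvTable (populacja : List (List Int)) (N : Int) : List (List Int) :=
  let prev0 : List Int := List.replicate (N + 1).toNat 0
  ((PySem.List.pyRange 0 N 1).foldl (fun s i =>
    let c := pvInner populacja s.2 i N
    (s.1 ++ [c.1], c.1)) ([prev0], prev0)).1

def kontakt_alt (x : Int) (y : Int) (r : Int) (N : Int) (populacja : List (List Int)) : Int :=
  let ilo := max (x - r) 0
  let ihi := min (x + r) (N - 1)
  let jlo := max (y - r) 0
  let jhi := min (y + r) (N - 1)
  if ilo > ihi ∨ jlo > jhi then 0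
  else
    let P := pvTable populacja N
    let total := PySem.List.pyGetD (PySem.List.pyGetD P (ihi + 1) []) (jhi + 1) 0
               - PySem.List.pyGetD (PySem.List.pyGetD P ilo []) (jhi + 1) 0
               - PySem.List.pyGetD (PySem.List.pyGetD P (ihi + 1) []) jlo 0
               + PySem.List.pyGetD (PySem.List.pyGetD P ilo []) jlo 0
    if ilo ≤ x ∧ x ≤ ihi ∧ jlo ≤ y ∧ y ≤ jhi ∧ pvCell populacja x y = 1 then total - 1 else total

-- ===== PRECONDITION & SPEC =====
-- Pre_: if the board-clamped window is nonempty, the board contains the full N x N grid.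
-- Outside it one of the Pythons raises IndexError on some cell read: B precomputes the
-- whole-board prefix table (it reads every cell of [0,N)^2) while A reads only window cells,
-- so on some excluded boards A still returns a value and B raises (see cites in claim.json).
def Pre_kontakt (x : Int) (y : Int) (r : Int) (N : Int) (populacja : List (List Int)) : Prop :=
  (max (x - r) 0 ≤ min (x + r) (N - 1) ∧ max (y - r) 0 ≤ min (y + r) (N - 1)) →
    (N ≤ (populacja.length : Int) ∧
     ∀ p ∈ populacja.zipIdx, (p.2 : Int) < N → N ≤ (p.1.length : Int))
instance (x : Int) (y : Int) (r : Int) (N : Int) (populacja : List (List Int)) : Decidable (Pre_kontakt x y r N populacja) := by unfold Pre_kontakt; infer_instance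

def pvWitness_kontakt : Int × Int × Int × Int × List (List Int) :=
  (1, 1, 1, 3, [[0, 1, 0], [1, 0, 1], [0, 1, 1]])

def Spec_kontakt (x : Int) (y : Int) (r : Int) (N : Int) (populacja : List (List Int)) (out : Int) : Prop := out = kontakt_alt x y r N populacja
instance (x : Int) (y : Int) (r : Int) (N : Int) (populacja : List (List Int)) (out : Int) : Decidable (Spec_kontakt x y r N populacja out) := by unfold Spec_kontakt; infer_instance

-- ===== CLAIM (what is proved, stated in full; the proofs are below) =====
def Claim_equal_kontakt : Prop := ∀ (x : Int) (y : Int) (r : Int) (N : Int) (populacja : List (List Int)), Dom_kontakt x y r N populacja → Pre_kontakt x y r N populacja → Spec_kontakt x y r N populacja (kontakt x y r N populacja)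

-- ===== LEMMAS AND PROOFS =====

-- cell indicator, row partial sum over columns [0,b), and 2D prefix sum over rows [0,a)
def pvInd (populacja : List (List Int)) (i j : Int) : Int :=
  if pvCell populacja i j = 1 then 1 else 0

def pvRowS (populacja : List (List Int)) (i b : Int) : Int :=
  ((PySem.List.pyRange 0 b 1).map (pvInd populacja i)).sum

def pvPref (populacja : List (List Int)) (a b : Int) : Int :=
  ((PySem.List.pyRange 0 a 1).map (fun i => pvRowS populacja i b)).sum

theorem pv_sum_map_zero {α : Type} (l : List α) (f : α → Int)
    (h : ∀ i ∈ l, f i = 0) : (l.map f).sum = 0 := by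
  apply List.sum_eq_zero
  intro v hv
  obtain ⟨i, hi, rfl⟩ := List.mem_map.1 hv
  exact h i hi

theorem pv_sum_map_sub {α : Type} (l : List α) (f g : α → Int) :
    (l.map (fun a => f a - g a)).sum = (l.map f).sum - (l.map g).sum := by
  induction l with
  | nil => simp
  | cons a l ih => simp [ih]; omega

-- the counting fold is init plus a 0/1 sum
theorem pv_foldl_count (l : List Int) (p : Int → Prop) [DecidablePred p] (z : Int) :
    l.foldl (fun t j => if p j then t + 1 else t) z
      = z + (l.map (fun j => if p j then (1 : Int) else 0)).sum := by
  rw [← PySem.List.foldl_add]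
  apply PySem.List.foldl_congr_mem
  intro acc j _
  split_ifs <;> omega

theorem pv_nested (l l' : List Int) (p : Int → Int → Prop) [∀ i j : Int, Decidable (p i j)] :
    l.foldl (fun z i => l'.foldl (fun z j => if p i j then z + 1 else z) z) 0
      = (l.map (fun i => (l'.map (fun j => if p i j then (1 : Int) else 0)).sum)).sum := by
  have h : (fun (z : Int) (i : Int) => l'.foldl (fun z j => if p i j then z + 1 else z) z)
       = (fun z i => z + (l'.map (fun j => if p i j then (1 : Int) else 0)).sum) := by
    funext z i; exact pv_foldl_count l' (p i) z
  rw [h, PySem.List.foldl_add, zero_add]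

-- clamp a range sum when f vanishes outside [lo, hi]
theorem pv_clamp (f : Int → Int) (a b lo hi : Int)
    (h : ∀ i, a ≤ i → i < b → (i < lo ∨ hi < i) → f i = 0) :
    ((PySem.List.pyRange a b 1).map f).sum
      = ((PySem.List.pyRange (max a lo) (min b (hi + 1)) 1).map f).sum := by
  by_cases hc : max a lo ≤ min b (hi + 1)
  · have e1 : PySem.List.pyRange a b 1
        = PySem.List.pyRange a (max a lo) 1 ++ PySem.List.pyRange (max a lo) b 1 :=
      PySem.List.pyRange_one_append a (max a lo) b (by omega) (by omega)
    have e2 : PySem.List.pyRange (max a lo) b 1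
        = PySem.List.pyRange (max a lo) (min b (hi + 1)) 1 ++ PySem.List.pyRange (min b (hi + 1)) b 1 :=
      PySem.List.pyRange_one_append (max a lo) (min b (hi + 1)) b hc (by omega)
    have z1 : ((PySem.List.pyRange a (max a lo) 1).map f).sum = 0 := by
      apply pv_sum_map_zero
      intro i hi
      rw [PySem.List.mem_pyRange_one] at hi
      exact h i (by omega) (by omega) (by omega)
    have z2 : ((PySem.List.pyRange (min b (hi + 1)) b 1).map f).sum = 0 := by
      apply pv_sum_map_zero
      intro i hi
      rw [PySem.List.mem_pyRange_one] at hi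
      exact h i (by omega) (by omega) (by omega)
    rw [e1, e2]
    simp only [List.map_append, List.sum_append]
    omega
  · rw [PySem.List.pyRange_one_eq_nil (a := max a lo) (by omega)]
    simp only [List.map_nil, List.sum_nil]
    apply pv_sum_map_zero
    intro i hi
    rw [PySem.List.mem_pyRange_one] at hi
    exact h i hi.1 hi.2 (by omega)

-- a delta summed over a range
theorem pv_delta_nat (v yv : Int) : ∀ (n : Nat) (a : Int),
    ((List.range n).map (fun (k : Nat) => if a + (k : Int) = yv then v else 0)).sum
      = if a ≤ yv ∧ yv < a + (n : Int) then v else 0 := by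
  intro n
  induction n with
  | zero =>
    intro a
    simp only [List.range_zero, List.map_nil, List.sum_nil, Nat.cast_zero]
    rw [if_neg (by omega)]
  | succ n ih =>
    intro a
    rw [List.range_succ]
    simp only [List.map_append, List.sum_append, ih, List.map_cons, List.map_nil,
      List.sum_cons, List.sum_nil]
    push_cast
    split_ifs <;> omega

theorem pv_delta (a b yv v : Int) :
    ((PySem.List.pyRange a b 1).map (fun j => if j = yv then v else 0)).sum
      = if a ≤ yv ∧ yv < b then v else 0 := by
  rw [PySem.List.pyRange_one, List.map_map,
      show ((fun j => if j = yv then v else 0) ∘ (fun k : Nat => a + (k : Int)))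
        = (fun k : Nat => if a + (k : Int) = yv then v else 0) from rfl,
      pv_delta_nat v yv (b - a).toNat a]
  split_ifs <;> omega

theorem poprawne_iff (a b N : Int) :
    poprawne_wspolrzedne a b N = true ↔ 0 ≤ a ∧ a < N ∧ 0 ≤ b ∧ b < N := by
  unfold poprawne_wspolrzedne
  split_ifs with h <;> simp [h]

-- A equals the clamped-window sum minus the center indicator (unconditionally)
theorem kontakt_eq_window (x y r N : Int) (populacja : List (List Int)) :
    kontakt x y r N populacja
      = ((PySem.List.pyRange (max (x - r) 0) (min (x + r) (N - 1) + 1) 1).map (fun i =>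
          ((PySem.List.pyRange (max (y - r) 0) (min (y + r) (N - 1) + 1) 1).map
            (fun j => pvInd populacja i j)).sum)).sum
        - (if max (x - r) 0 ≤ x ∧ x ≤ min (x + r) (N - 1) ∧ max (y - r) 0 ≤ y ∧
             y ≤ min (y + r) (N - 1) ∧ pvCell populacja x y = 1 then 1 else 0) := by
  have hbody : ∀ (i : Int),
      (fun (z : Int) (j : Int) => if poprawne_wspolrzedne i j N = true ∧ (i ≠ x ∨ j ≠ y) then
          (if pvCell populacja i j = 1 then z + 1 else z) else z)
        = (fun z j => if (poprawne_wspolrzedne i j N = true ∧ (i ≠ x ∨ j ≠ y)) ∧ pvCell populacja i j = 1 then z + 1 else z) := by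
    intro i; funext z j; split_ifs <;> tauto
  unfold kontakt
  simp only [hbody]
  rw [pv_nested _ _ (fun i j => (poprawne_wspolrzedne i j N = true ∧ (i ≠ x ∨ j ≠ y)) ∧ pvCell populacja i j = 1)]
  rw [pv_clamp (fun i => ((PySem.List.pyRange (y - r) (y + r + 1) 1).map
        (fun j => if (poprawne_wspolrzedne i j N = true ∧ (i ≠ x ∨ j ≠ y)) ∧ pvCell populacja i j = 1 then (1 : Int) else 0)).sum)
      (x - r) (x + r + 1) 0 (N - 1) ?hout]
  case hout =>
    intro i _ _ hi
    apply pv_sum_map_zero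
    intro j _
    rw [if_neg]
    rintro ⟨⟨hp, -⟩, -⟩
    rw [poprawne_iff] at hp
    omega
  rw [show min (x + r + 1) (N - 1 + 1) = min (x + r) (N - 1) + 1 from by omega]
  have hin : List.map (fun i => ((PySem.List.pyRange (y - r) (y + r + 1) 1).map
        (fun j => if (poprawne_wspolrzedne i j N = true ∧ (i ≠ x ∨ j ≠ y)) ∧ pvCell populacja i j = 1 then (1 : Int) else 0)).sum)
        (PySem.List.pyRange (max (x - r) 0) (min (x + r) (N - 1) + 1) 1)
      = List.map (fun i => ((PySem.List.pyRange (max (y - r) 0) (min (y + r) (N - 1) + 1) 1).map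
        (fun j => pvInd populacja i j
          - (if j = y then (if i = x ∧ pvCell populacja i y = 1 then 1 else 0) else 0))).sum)
        (PySem.List.pyRange (max (x - r) 0) (min (x + r) (N - 1) + 1) 1) := by
    apply List.map_congr_left
    intro i hi
    rw [PySem.List.mem_pyRange_one] at hi
    rw [pv_clamp _ (y - r) (y + r + 1) 0 (N - 1) ?hj]
    case hj =>
      intro j _ _ hj
      rw [if_neg]
      rintro ⟨⟨hp, -⟩, -⟩
      rw [poprawne_iff] at hp
      omega
    rw [show min (y + r + 1) (N - 1 + 1) = min (y + r) (N - 1) + 1 from by omega]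
    apply congrArg
    apply List.map_congr_left
    intro j hj
    rw [PySem.List.mem_pyRange_one] at hj
    have hp : poprawne_wspolrzedne i j N = true := by rw [poprawne_iff]; omega
    unfold pvInd
    by_cases hjy : j = y
    · subst hjy
      simp only [hp, true_and]
      split_ifs <;> tauto
    · simp only [hp, true_and, if_neg hjy]
      split_ifs <;> tauto
  rw [hin]
  have hsplit : ∀ (i : Int),
      ((PySem.List.pyRange (max (y - r) 0) (min (y + r) (N - 1) + 1) 1).map
        (fun j => pvInd populacja i j
          - (if j = y then (if i = x ∧ pvCell populacja i y = 1 then 1 else 0) else 0))).sum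
      = ((PySem.List.pyRange (max (y - r) 0) (min (y + r) (N - 1) + 1) 1).map
          (fun j => pvInd populacja i j)).sum
        - (if i = x then (if (max (y - r) 0 ≤ y ∧ y < min (y + r) (N - 1) + 1) ∧ pvCell populacja x y = 1 then (1 : Int) else 0) else 0) := by
    intro i
    rw [pv_sum_map_sub, pv_delta]
    congr 1
    by_cases hix : i = x
    · subst hix; split_ifs <;> tauto
    · simp [hix]
  simp only [hsplit]
  rw [pv_sum_map_sub
        (f := fun i => ((PySem.List.pyRange (max (y - r) 0) (min (y + r) (N - 1) + 1) 1).map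
          (fun j => pvInd populacja i j)).sum)
        (g := fun i => if i = x then (if (max (y - r) 0 ≤ y ∧ y < min (y + r) (N - 1) + 1) ∧ pvCell populacja x y = 1 then (1 : Int) else 0) else 0),
      pv_delta]
  congr 1
  by_cases hc : pvCell populacja x y = 1 <;> split_ifs <;> first | rfl | tauto | omega

-- the row recurrence: pvPref (k+1) (j+1) - pvPref (k+1) j in terms of the previous row
theorem pv_rowS_succ (populacja : List (List Int)) (i b : Int) (hb : 0 ≤ b) :
    pvRowS populacja i (b + 1) = pvRowS populacja i b + pvInd populacja i b := by
  unfold pvRowS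
  rw [PySem.List.pyRange_one_succ_right hb]
  simp

theorem pv_pref_succ (populacja : List (List Int)) (a b : Int) (ha : 0 ≤ a) :
    pvPref populacja (a + 1) b = pvPref populacja a b + pvRowS populacja a b := by
  unfold pvPref
  rw [PySem.List.pyRange_one_succ_right ha]
  simp

theorem pv_pref_zero (populacja : List (List Int)) (b : Int) :
    pvPref populacja 0 b = 0 := by
  unfold pvPref
  rw [PySem.List.pyRange_one_eq_nil (by omega)]
  simp

theorem pv_rowS_zero (populacja : List (List Int)) (i : Int) :
    pvRowS populacja i 0 = 0 := by
  unfold pvRowS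
  rw [PySem.List.pyRange_one_eq_nil (by omega)]
  simp

theorem pv_pref_b_zero (populacja : List (List Int)) (a : Int) :
    pvPref populacja a 0 = 0 := by
  unfold pvPref
  apply pv_sum_map_zero
  intro i _
  exact pv_rowS_zero populacja i

-- the inner fold builds the next prefix row
theorem pvInner_spec (populacja : List (List Int)) (N k : Int) (hN : 0 ≤ N) (hk : 0 ≤ k) :
    pvInner populacja ((PySem.List.pyRange 0 (N + 1) 1).map (fun b => pvPref populacja k b)) k N
      = ((PySem.List.pyRange 0 (N + 1) 1).map (fun b => pvPref populacja (k + 1) b),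
         pvPref populacja (k + 1) N) := by
  unfold pvInner
  have main : ∀ (m : Nat), (m : Int) ≤ N →
      (PySem.List.pyRange 0 (m : Int) 1).foldl (fun t j =>
        let last := t.2 + PySem.List.pyGetD ((PySem.List.pyRange 0 (N + 1) 1).map (fun b => pvPref populacja k b)) (j + 1) 0
                        - PySem.List.pyGetD ((PySem.List.pyRange 0 (N + 1) 1).map (fun b => pvPref populacja k b)) j 0
                        + (if pvCell populacja k j = 1 then 1 else 0)
        (t.1 ++ [last], last)) ([0], 0)
      = ((PySem.List.pyRange 0 ((m : Int) + 1) 1).map (fun b => pvPref populacja (k + 1) b),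
         pvPref populacja (k + 1) (m : Int)) := by
    intro m
    induction m with
    | zero =>
      intro _
      rw [PySem.List.pyRange_one_eq_nil (a := 0) (b := ((0 : Nat) : Int)) (by omega)]
      rw [show ((0 : Nat) : Int) + 1 = 0 + 1 from by omega, PySem.List.pyRange_one_singleton]
      simp [pv_pref_b_zero]
    | succ m ih =>
      intro hm
      have hm' : (m : Int) ≤ N := by push_cast at hm ⊢; omega
      rw [show ((m + 1 : Nat) : Int) = (m : Int) + 1 from by push_cast; ring,
          PySem.List.pyRange_one_succ_right (a := 0) (b := (m : Int)) (by omega),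
          List.foldl_append, ih hm']
      simp only [List.foldl_cons, List.foldl_nil]
      have g1 : PySem.List.pyGetD ((PySem.List.pyRange 0 (N + 1) 1).map (fun b => pvPref populacja k b)) ((m : Int) + 1) 0
          = pvPref populacja k ((m : Int) + 1) :=
        PySem.List.pyGetD_map_pyRange_of_nonneg _ _ _ _ (by omega) (by omega)
      have g2 : PySem.List.pyGetD ((PySem.List.pyRange 0 (N + 1) 1).map (fun b => pvPref populacja k b)) (m : Int) 0
          = pvPref populacja k (m : Int) :=
        PySem.List.pyGetD_map_pyRange_of_nonneg _ _ _ _ (by omega) (by omega)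
      rw [g1, g2]
      have hval : pvPref populacja (k + 1) (m : Int)
            + pvPref populacja k ((m : Int) + 1) - pvPref populacja k (m : Int)
            + (if pvCell populacja k (m : Int) = 1 then 1 else 0)
          = pvPref populacja (k + 1) ((m : Int) + 1) := by
        have e1 := pv_pref_succ populacja k ((m : Int) + 1) hk
        have e2 := pv_pref_succ populacja k (m : Int) hk
        have e3 := pv_rowS_succ populacja k (m : Int) (by omega)
        unfold pvInd at e3
        omega
      rw [PySem.List.pyRange_one_succ_right (a := 0) (b := (m : Int) + 1) (by omega)]
      simp only [List.map_append, List.map_cons, List.map_nil]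
      rw [hval]
  have hfin := main N.toNat (by omega)
  rw [show ((N.toNat : Int)) = N from by omega] at hfin
  exact hfin

-- the outer fold builds the full prefix table
theorem pvTable_spec (populacja : List (List Int)) (N : Int) (hN : 0 ≤ N) :
    pvTable populacja N
      = (PySem.List.pyRange 0 (N + 1) 1).map (fun a =>
          (PySem.List.pyRange 0 (N + 1) 1).map (fun b => pvPref populacja a b)) := by
  unfold pvTable
  have hrow0 : List.replicate (N + 1).toNat (0 : Int)
      = (PySem.List.pyRange 0 (N + 1) 1).map (fun b => pvPref populacja 0 b) := by
    have : (PySem.List.pyRange 0 (N + 1) 1).map (fun b => pvPref populacja 0 b)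
        = (PySem.List.pyRange 0 (N + 1) 1).map (fun _ => (0 : Int)) := by
      apply List.map_congr_left
      intro b _
      exact pv_pref_zero populacja b
    rw [this, List.map_const', PySem.List.length_pyRange_one]
    simp
  simp only [hrow0]
  have main : ∀ (m : Nat), (m : Int) ≤ N →
      (PySem.List.pyRange 0 (m : Int) 1).foldl (fun s i =>
        let c := pvInner populacja s.2 i N
        (s.1 ++ [c.1], c.1))
        ([(PySem.List.pyRange 0 (N + 1) 1).map (fun b => pvPref populacja 0 b)],
         (PySem.List.pyRange 0 (N + 1) 1).map (fun b => pvPref populacja 0 b))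
      = ((PySem.List.pyRange 0 ((m : Int) + 1) 1).map (fun a =>
           (PySem.List.pyRange 0 (N + 1) 1).map (fun b => pvPref populacja a b)),
         (PySem.List.pyRange 0 (N + 1) 1).map (fun b => pvPref populacja (m : Int) b)) := by
    intro m
    induction m with
    | zero =>
      intro _
      rw [PySem.List.pyRange_one_eq_nil (a := 0) (b := ((0 : Nat) : Int)) (by omega)]
      rw [show ((0 : Nat) : Int) + 1 = 0 + 1 from by omega, PySem.List.pyRange_one_singleton]
      simp
    | succ m ih =>
      intro hm
      have hm' : (m : Int) ≤ N := by push_cast at hm ⊢; omega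
      rw [show ((m + 1 : Nat) : Int) = (m : Int) + 1 from by push_cast; ring,
          PySem.List.pyRange_one_succ_right (a := 0) (b := (m : Int)) (by omega),
          List.foldl_append, ih hm']
      simp only [List.foldl_cons, List.foldl_nil]
      rw [pvInner_spec populacja N (m : Int) hN (by omega)]
      rw [PySem.List.pyRange_one_succ_right (a := 0) (b := (m : Int) + 1) (by omega)]
      simp only [List.map_append, List.map_cons, List.map_nil]
  have hfin := main N.toNat (by omega)
  rw [show ((N.toNat : Int)) = N from by omega] at hfin
  rw [hfin]

-- reading the table
theorem pvTable_get (populacja : List (List Int)) (N a b : Int) (hN : 0 ≤ N)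
    (ha : 0 ≤ a) (ha' : a ≤ N) (hb : 0 ≤ b) (hb' : b ≤ N) :
    PySem.List.pyGetD (PySem.List.pyGetD (pvTable populacja N) a []) b 0
      = pvPref populacja a b := by
  rw [pvTable_spec populacja N hN,
      PySem.List.pyGetD_map_pyRange_of_nonneg _ _ _ _ ha (by omega),
      PySem.List.pyGetD_map_pyRange_of_nonneg _ _ _ _ hb (by omega)]

-- inclusion-exclusion: the window sum from four prefix values
theorem pv_pref_window (populacja : List (List Int)) (a a' b b' : Int)
    (ha : 0 ≤ a) (haa : a ≤ a') (hb : 0 ≤ b) (hbb : b ≤ b') :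
    pvPref populacja a' b' - pvPref populacja a b' - pvPref populacja a' b + pvPref populacja a b
      = ((PySem.List.pyRange a a' 1).map (fun i =>
          ((PySem.List.pyRange b b' 1).map (fun j => pvInd populacja i j)).sum)).sum := by
  have hsplitA : ∀ c : Int, pvPref populacja a' c
      = pvPref populacja a c + ((PySem.List.pyRange a a' 1).map (fun i => pvRowS populacja i c)).sum := by
    intro c
    unfold pvPref
    rw [PySem.List.pyRange_one_append 0 a a' ha haa]
    simp
  have hrow : ∀ i : Int, pvRowS populacja i b' - pvRowS populacja i b
      = ((PySem.List.pyRange b b' 1).map (fun j => pvInd populacja i j)).sum := by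
    intro i
    unfold pvRowS
    rw [PySem.List.pyRange_one_append 0 b b' hb hbb]
    simp only [List.map_append, List.sum_append]
    ring
  rw [hsplitA b', hsplitA b]
  have : ((PySem.List.pyRange a a' 1).map (fun i => pvRowS populacja i b')).sum
       - ((PySem.List.pyRange a a' 1).map (fun i => pvRowS populacja i b)).sum
      = ((PySem.List.pyRange a a' 1).map (fun i =>
          ((PySem.List.pyRange b b' 1).map (fun j => pvInd populacja i j)).sum)).sum := by
    rw [← pv_sum_map_sub]
    apply congrArg
    apply List.map_congr_left
    intro i _
    exact hrow i
  omega

-- the two ports agree on every input (the Lean ports are total; Pre_ matters only for Python)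
theorem kontakt_eq_alt (x y r N : Int) (populacja : List (List Int)) :
    kontakt x y r N populacja = kontakt_alt x y r N populacja := by
  rw [kontakt_eq_window]
  simp only [kontakt_alt]
  by_cases hempty : max (x - r) 0 > min (x + r) (N - 1) ∨ max (y - r) 0 > min (y + r) (N - 1)
  · rw [if_pos hempty]
    have hz : ((PySem.List.pyRange (max (x - r) 0) (min (x + r) (N - 1) + 1) 1).map (fun i =>
          ((PySem.List.pyRange (max (y - r) 0) (min (y + r) (N - 1) + 1) 1).map
            (fun j => pvInd populacja i j)).sum)).sum = 0 := by
      rcases hempty with h | h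
      · rw [PySem.List.pyRange_one_eq_nil
            (a := max (x - r) 0) (b := min (x + r) (N - 1) + 1) (by omega)]
        simp
      · apply pv_sum_map_zero
        intro i _
        rw [PySem.List.pyRange_one_eq_nil
            (a := max (y - r) 0) (b := min (y + r) (N - 1) + 1) (by omega)]
        simp
    have hc : ¬ (max (x - r) 0 ≤ x ∧ x ≤ min (x + r) (N - 1) ∧ max (y - r) 0 ≤ y ∧
        y ≤ min (y + r) (N - 1) ∧ pvCell populacja x y = 1) := by
      rcases hempty with h | h
      · rintro ⟨h1, h2, -⟩; omega
      · rintro ⟨-, -, h3, h4, -⟩; omega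
    rw [hz, if_neg hc]
    omega
  · rw [if_neg hempty]
    rw [not_or, not_lt, not_lt] at hempty
    obtain ⟨h1, h2⟩ := hempty
    have hN : 0 ≤ N := by omega
    rw [pvTable_get populacja N (min (x + r) (N - 1) + 1) (min (y + r) (N - 1) + 1) hN (by omega) (by omega) (by omega) (by omega),
        pvTable_get populacja N (max (x - r) 0) (min (y + r) (N - 1) + 1) hN (by omega) (by omega) (by omega) (by omega),
        pvTable_get populacja N (min (x + r) (N - 1) + 1) (max (y - r) 0) hN (by omega) (by omega) (by omega) (by omega),
        pvTable_get populacja N (max (x - r) 0) (max (y - r) 0) hN (by omega) (by omega) (by omega) (by omega)]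
    rw [pv_pref_window populacja (max (x - r) 0) (min (x + r) (N - 1) + 1) (max (y - r) 0) (min (y + r) (N - 1) + 1)
        (by omega) (by omega) (by omega) (by omega)]
    split_ifs with hctr
    · omega
    · omega

-- ===== VERDICT (by name: the statement is the Claim_ definition above) =====
theorem kontakt_spec : Claim_equal_kontakt := by
  intro x y r N populacja _ _
  exact kontakt_eq_alt x y r N populacja
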